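-- pv_equiv track=rewrite | github.com/ernest0507/algs_tasks | leetcode/leetcode_1482.py | f
-- ===== SOURCE A (Python) =====
-- def f(arr, c, k):
--     a = ['x' if x <= c else '_' for x in arr]
--     count, total_count = 0, 0
--     for i in range(len(a)):
--         if a[i] == 'x':
--             count += 1
--         else:
--             total_count += count // k
--             count = 0
--     total_count += count // k
--     return total_count
-- ===== SOURCE B (Python) =====
-- def f(arr, c, k):
--     # Separator-position decomposition: collect the indices of big elements,
--     # pad with sentinels -1 and len(arr); the gap between consecutive
--     # separators p < q holds exactly q - p - 1 small elements, contributing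
--     # (q - p - 1) // k groups.  No run counter is maintained.
--     bounds = [-1] + [i for i, x in enumerate(arr) if x > c] + [len(arr)]
--     total = 0
--     for p, q in zip(bounds, bounds[1:]):
--         total += (q - p - 1) // k
--     return total
-- ===== Notes on version B (the rewrite author's own statement) =====
-- stated objective: alternative
-- what changed: B discards A's reset-on-separator run counter: it first collects the positions of the elements > c, pads them with sentinels -1 and len(arr), and then sums (q - p - 1) // k over consecutive separator pairs, turning the run lengths into pure index arithmetic.
import Mathlib
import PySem

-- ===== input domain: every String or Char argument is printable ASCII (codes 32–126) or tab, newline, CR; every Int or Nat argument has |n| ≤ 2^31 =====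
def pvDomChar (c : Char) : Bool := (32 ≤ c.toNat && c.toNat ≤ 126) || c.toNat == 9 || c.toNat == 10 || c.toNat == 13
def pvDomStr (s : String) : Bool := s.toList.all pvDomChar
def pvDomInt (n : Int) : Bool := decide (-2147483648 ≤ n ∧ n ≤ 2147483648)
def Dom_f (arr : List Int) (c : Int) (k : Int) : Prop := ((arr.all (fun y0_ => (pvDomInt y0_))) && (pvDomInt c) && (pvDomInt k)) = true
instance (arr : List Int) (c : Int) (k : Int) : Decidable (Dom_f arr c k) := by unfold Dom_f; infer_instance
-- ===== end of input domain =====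

-- B replaces A's reset-on-separator run counter by a staged decomposition:
-- collect indices of elements > c, pad with sentinels -1 and len(arr), and sum
-- (q - p - 1) // k over consecutive separator pairs (objective: alternative).


-- ===== PORT A =====
def f (arr : List Int) (c : Int) (k : Int) : Int :=
  let a := arr.map (fun x => if x ≤ c then "x" else "_")
  let st := a.foldl (fun (p : Int × Int) s =>
      if s = "x" then (p.1 + 1, p.2)
      else (0, p.2 + PySem.Int.floordiv p.1 k)) ((0 : Int), (0 : Int))
  st.2 + PySem.Int.floordiv st.1 k

-- ===== PORT B =====
def f_alt (arr : List Int) (c : Int) (k : Int) : Int :=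
  let bounds : List Int :=
    (-1) :: ((PySem.List.enumerate arr 0).filterMap
        (fun ix => if ix.2 > c then some ix.1 else none)) ++ [(arr.length : Int)]
  (bounds.zip (bounds.drop 1)).foldl
    (fun total pq => total + PySem.Int.floordiv (pq.2 - pq.1 - 1) k) 0

-- ===== PRECONDITION & SPEC =====
-- Pre_f excludes k = 0, on which the Python A raises ZeroDivisionError.
def Pre_f (arr : List Int) (c : Int) (k : Int) : Prop := k ≠ 0
instance (arr : List Int) (c : Int) (k : Int) : Decidable (Pre_f arr c k) := by unfold Pre_f; infer_instance
def pvWitness_f : List Int × Int × Int := ([2, 1, 5, 1, 1, 1, 4], 3, 2)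

def Spec_f (arr : List Int) (c : Int) (k : Int) (out : Int) : Prop := out = f_alt arr c k
instance (arr : List Int) (c : Int) (k : Int) (out : Int) : Decidable (Spec_f arr c k out) := by unfold Spec_f; infer_instance

-- ===== CLAIM =====
def Claim_equal_f : Prop := ∀ (arr : List Int) (c : Int) (k : Int), Dom_f arr c k → Pre_f arr c k → Spec_f arr c k (f arr c k)

-- ===== LEMMAS AND PROOFS =====

-- reference function: total contribution of the rest of the list, given a current run length cnt
def spec (c k : Int) : List Int → Int → Int
  | [], cnt => PySem.Int.floordiv cnt k
  | x :: xs, cnt =>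
      if x ≤ c then spec c k xs (cnt + 1)
      else PySem.Int.floordiv cnt k + spec c k xs 0

-- A's fold, stated directly over the int list after map-fusion
theorem A_fold (c k : Int) (l : List Int) : ∀ cnt tot : Int,
    (l.foldl (fun (p : Int × Int) x =>
        if (if x ≤ c then "x" else "_") = "x" then (p.1 + 1, p.2)
        else (0, p.2 + PySem.Int.floordiv p.1 k)) (cnt, tot)).2
      + PySem.Int.floordiv (l.foldl (fun (p : Int × Int) x =>
        if (if x ≤ c then "x" else "_") = "x" then (p.1 + 1, p.2)
        else (0, p.2 + PySem.Int.floordiv p.1 k)) (cnt, tot)).1 k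
      = tot + spec c k l cnt := by
  induction l with
  | nil => intro cnt tot; simp [spec]
  | cons x xs ih =>
    intro cnt tot
    by_cases hx : x ≤ c
    · simpa [List.foldl, hx, spec] using ih (cnt + 1) tot
    · have hne : ("_" : String) ≠ "x" := by decide
      simp only [List.foldl, hx, if_false, hne, spec]
      rw [ih 0 (tot + PySem.Int.floordiv cnt k)]; ring

-- separator indices of l, enumeration starting at s
def seps (c : Int) (l : List Int) (s : Int) : List Int :=
  (PySem.List.enumerate l s).filterMap (fun ix => if ix.2 > c then some ix.1 else none)

-- B's pair-sum over consecutive elements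
def pairSum (k : Int) (bs : List Int) : Int :=
  (bs.zip (bs.drop 1)).foldl (fun total pq => total + PySem.Int.floordiv (pq.2 - pq.1 - 1) k) 0

theorem pairSum_acc (k : Int) (l : List (Int × Int)) : ∀ a : Int,
    l.foldl (fun total pq => total + PySem.Int.floordiv (pq.2 - pq.1 - 1) k) a
      = a + l.foldl (fun total pq => total + PySem.Int.floordiv (pq.2 - pq.1 - 1) k) 0 := by
  induction l with
  | nil => intro a; simp
  | cons x xs ih => intro a; rw [List.foldl, List.foldl, ih, ih (0 + _)]; ring

theorem pairSum_cons (k a b : Int) (t : List Int) :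
    pairSum k (a :: b :: t) = PySem.Int.floordiv (b - a - 1) k + pairSum k (b :: t) := by
  unfold pairSum
  rw [show (a :: b :: t).zip ((a :: b :: t).drop 1) = (a, b) :: (b :: t).zip t from rfl,
    List.foldl, pairSum_acc]
  simp [List.zip]

-- main lemma: the padded separator pair-sum computes the reference function
theorem pairSum_seps (c k : Int) (l : List Int) : ∀ s p : Int,
    pairSum k (p :: seps c l s ++ [s + (l.length : Int)]) = spec c k l (s - p - 1) := by
  induction l with
  | nil =>
    intro s p
    simp only [seps, PySem.List.enumerate, List.filterMap, List.length_nil, Int.natCast_zero,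
      add_zero, spec]
    simp [pairSum, List.zip, List.zipWith]
  | cons x xs ih =>
    intro s p
    have he : seps c (x :: xs) s
        = (if x > c then [s] else []) ++ seps c xs (s + 1) := by
      unfold seps
      rw [PySem.List.enumerate_cons, List.filterMap_cons]
      by_cases h : x > c <;> simp [h]
    by_cases hx : x ≤ c
    · have hx' : ¬ x > c := by omega
      rw [he, if_neg hx', List.nil_append, spec, if_pos hx]
      have := ih (s + 1) p
      have hlen : s + 1 + (xs.length : Int) = s + ((x :: xs).length : Int) := by
        simp [List.length_cons]; ring
      rw [hlen] at this
      rw [this]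
      ring_nf
    · have hx' : x > c := by omega
      rw [he, if_pos hx', spec, if_neg hx]
      have := ih (s + 1) s
      have hlen : s + 1 + (xs.length : Int) = s + ((x :: xs).length : Int) := by
        simp [List.length_cons]; ring
      rw [hlen] at this
      rw [List.cons_append] at this
      simp only [List.cons_append, List.nil_append]
      rw [pairSum_cons, this]
      norm_num

theorem f_alt_eq_spec (arr : List Int) (c k : Int) :
    f_alt arr c k = spec c k arr 0 := by
  show pairSum k ((-1) :: seps c arr 0 ++ [(arr.length : Int)]) = spec c k arr 0
  have := pairSum_seps c k arr 0 (-1)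
  simpa using this

-- ===== VERDICT =====
theorem f_spec : Claim_equal_f := by
  intro arr c k _ _
  unfold Spec_f f
  rw [f_alt_eq_spec]
  simp only [List.foldl_map]
  simpa using A_fold c k arr 0 0
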